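-- pv_equiv track=rewrite | github.com/Stefanprogramator/Sorting-in-python | SD_TEMA_1.py | verify
-- ===== SOURCE A (Python) =====
-- def verify(v, sortat, n):
--
--     if len(sortat) == n:
--         for _ in range(n - 1):
--             if sortat[_] > sortat[_ + 1]:
--                 return False
--     else:
--         return False
--
--     if sortat != sorted(v):
--         return False
--
--     return True
-- ===== SOURCE B (Python) =====
-- def verify(v, sortat, n):
--     # one pass over sortat checks order and builds a multiset counter;
--     # one pass over v consumes the counter (no sorting)
--     if len(sortat) != n:
--         return False
--     if len(v) != len(sortat):
--         return False
--     counts = {}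
--     prev = None
--     for x in sortat:
--         if prev is not None and prev > x:
--             return False
--         prev = x
--         counts[x] = counts.get(x, 0) + 1
--     for x in v:
--         c = counts.get(x, 0)
--         if c == 0:
--             return False
--         counts[x] = c - 1
--     return True
-- ===== Notes on version B (the rewrite author's own statement) =====
-- stated objective: alternative
-- what changed: Replaces A's sorted(v) call plus list equality with a single linear scan of sortat that checks adjacent order while building a count dictionary, and a second linear scan of v that consumes the counts (multiset equality), so nothing is ever sorted.
import Mathlib
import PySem

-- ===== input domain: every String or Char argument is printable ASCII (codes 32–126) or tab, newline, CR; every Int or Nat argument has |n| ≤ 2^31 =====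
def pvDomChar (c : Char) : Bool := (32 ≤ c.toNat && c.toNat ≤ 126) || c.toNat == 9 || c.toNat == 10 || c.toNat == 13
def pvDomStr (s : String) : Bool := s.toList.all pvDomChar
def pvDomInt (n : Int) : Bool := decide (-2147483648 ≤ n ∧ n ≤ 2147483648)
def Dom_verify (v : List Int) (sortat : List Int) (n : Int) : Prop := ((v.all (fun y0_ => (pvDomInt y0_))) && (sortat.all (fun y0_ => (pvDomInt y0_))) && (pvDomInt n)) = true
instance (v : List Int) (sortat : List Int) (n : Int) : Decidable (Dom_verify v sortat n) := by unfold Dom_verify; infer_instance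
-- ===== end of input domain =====

-- B avoids A's sorted(v): one linear pass checks adjacent order of sortat and counts it,
-- a second linear pass consumes the counts from v (multiset equality); objective: alternative

-- ===== PORT A =====
-- for _ in range(n-1): if sortat[_] > sortat[_+1]: return False
-- (indices are always in range when the loop runs, since len(sortat) == n; the 'none'
--  branch below is unreachable there)
def verifyLoopA (sortat : List Int) : List Int → Bool
  | [] => true
  | i :: rest =>
    match PySem.List.pyGet? sortat i, PySem.List.pyGet? sortat (i + 1) with
    | some a, some b => if a > b then false else verifyLoopA sortat rest
    | _, _ => false

def verify (v : List Int) (sortat : List Int) (n : Int) : Bool :=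
  if (sortat.length : Int) = n then
    if verifyLoopA sortat (PySem.List.pyRange 0 (n - 1) 1) then
      if sortat ≠ PySem.List.sorted v (fun x => x) false then false
      else true
    else false
  else false

-- ===== PORT B =====
-- first loop of Source B: order check over sortat while building the counter dict
def altFill (counts : PySem.Dict Int Int) (prev : Option Int) :
    List Int → Option (PySem.Dict Int Int)
  | [] => some counts
  | x :: rest =>
    match prev with
    | some p =>
        if p > x then none
        else altFill (counts.insert x (counts.getD x 0 + 1)) (some x) rest
    | none => altFill (counts.insert x (counts.getD x 0 + 1)) (some x) rest

-- second loop of Source B: consume the counts from v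
def altDrain (counts : PySem.Dict Int Int) : List Int → Bool
  | [] => true
  | x :: rest =>
    let c := counts.getD x 0
    if c = 0 then false
    else altDrain (counts.insert x (c - 1)) rest

def verify_alt (v : List Int) (sortat : List Int) (n : Int) : Bool :=
  if (sortat.length : Int) ≠ n then false
  else if (v.length : Int) ≠ (sortat.length : Int) then false
  else
    match altFill PySem.Dict.empty none sortat with
    | none => false
    | some d => altDrain d v

-- ===== PRECONDITION & SPEC =====
def Spec_verify (v : List Int) (sortat : List Int) (n : Int) (out : Bool) : Prop := out = verify_alt v sortat n
instance (v : List Int) (sortat : List Int) (n : Int) (out : Bool) : Decidable (Spec_verify v sortat n out) := by unfold Spec_verify; infer_instance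

-- ===== CLAIM (what is proved, stated in full; the proofs are below) =====
def Claim_equal_verify : Prop := ∀ (v : List Int) (sortat : List Int) (n : Int), Dom_verify v sortat n → Spec_verify v sortat n (verify v sortat n)

-- ===== LEMMAS AND PROOFS =====

lemma fill_getD (l : List Int) : ∀ (counts : PySem.Dict Int Int) (prev : Option Int)
    (d : PySem.Dict Int Int), altFill counts prev l = some d →
    ∀ x, d.getD x 0 = counts.getD x 0 + (l.count x : Int) := by
  induction l with
  | nil =>
    intro counts prev d h x
    simp only [altFill, Option.some.injEq] at h
    subst h; simp
  | cons y rest ih =>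
    intro counts prev d h x
    have key : altFill (counts.insert y (counts.getD y 0 + 1)) (some y) rest = some d := by
      cases prev with
      | none => simpa [altFill] using h
      | some p =>
        simp only [altFill] at h
        by_cases hp : p > y
        · simp [hp] at h
        · simpa [hp] using h
    have hrec := ih _ (some y) d key x
    rw [hrec, PySem.Dict.getD_insert]
    by_cases hxy : x = y
    · subst hxy; simp; omega
    · have hne : (y == x) = false := by simp; omega
      simp [hxy, List.count_cons, hne]

lemma fill_isSome_some (l : List Int) : ∀ (counts : PySem.Dict Int Int) (p : Int),
    (altFill counts (some p) l).isSome = true ↔ List.IsChain (· ≤ ·) (p :: l) := by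
  induction l with
  | nil => intro counts p; simp [altFill]
  | cons y rest ih =>
    intro counts p
    simp only [altFill]
    by_cases hp : p > y
    · simp only [hp, if_true, Option.isSome_none, List.isChain_cons_cons]
      constructor
      · intro h; simp at h
      · intro h; omega
    · rw [if_neg hp, ih, List.isChain_cons_cons]
      constructor
      · intro h; exact ⟨by omega, h⟩
      · intro h; exact h.2

lemma fill_isSome_none (l : List Int) (counts : PySem.Dict Int Int) :
    (altFill counts none l).isSome = true ↔ List.IsChain (· ≤ ·) l := by
  cases l with
  | nil => simp [altFill]
  | cons y rest =>
    simp only [altFill]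
    rw [fill_isSome_some]

lemma drain_iff (v : List Int) : ∀ (d : PySem.Dict Int Int),
    (∀ x, 0 ≤ d.getD x 0) →
    (altDrain d v = true ↔ ∀ x, (v.count x : Int) ≤ d.getD x 0) := by
  induction v with
  | nil => intro d hd; simpa [altDrain] using fun x => hd x
  | cons y rest ih =>
    intro d hd
    simp only [altDrain]
    by_cases hc : d.getD y 0 = 0
    · simp only [hc, if_pos]
      constructor
      · intro h; exact absurd h (by simp)
      · intro h
        have := h y
        simp [hc] at this
        omega
    · rw [if_neg hc]
      have hpos : 1 ≤ d.getD y 0 := by have := hd y; omega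
      have hd' : ∀ x, 0 ≤ (d.insert y (d.getD y 0 - 1)).getD x 0 := by
        intro x
        rw [PySem.Dict.getD_insert]
        split
        · omega
        · exact hd x
      rw [ih _ hd']
      constructor
      · intro h x
        have hx := h x
        rw [PySem.Dict.getD_insert] at hx
        by_cases hxy : x = y
        · subst hxy; simp at hx; simp; omega
        · rw [if_neg hxy] at hx
          have hne : (y == x) = false := by simp; omega
          simp [List.count_cons, hne]; omega
      · intro h x
        have hx := h x
        rw [PySem.Dict.getD_insert]
        by_cases hxy : x = y
        · subst hxy; simp; simp at hx; omega
        · rw [if_neg hxy]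
          have hne : (y == x) = false := by simp; omega
          simp [List.count_cons, hne] at hx
          omega

lemma loopA_cons (sortat : List Int) (i : Int) (rest : List Int) (x y : Int)
    (hx : PySem.List.pyGet? sortat i = some x)
    (hy : PySem.List.pyGet? sortat (i + 1) = some y) :
    verifyLoopA sortat (i :: rest) = if x > y then false else verifyLoopA sortat rest := by
  simp [verifyLoopA, hx, hy]

lemma loopA_drop (sortat : List Int) (k : Nat) : ∀ (a : Nat), a + k = sortat.length →
    (verifyLoopA sortat (PySem.List.pyRange (a : Int) ((sortat.length : Int) - 1) 1) = true ↔
      List.IsChain (· ≤ ·) (sortat.drop a)) := by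
  induction k with
  | zero =>
    intro a ha
    rw [PySem.List.pyRange_one_eq_nil (by omega),
      show a = sortat.length from by omega, List.drop_length]
    simp [verifyLoopA]
  | succ k ih =>
    intro a ha
    by_cases hlast : a + 1 = sortat.length
    · rw [PySem.List.pyRange_one_eq_nil (by omega)]
      have hdrop : sortat.drop a = [sortat[a]'(by omega)] := by
        rw [List.drop_eq_getElem_cons (by omega)]
        simp [show a + 1 = sortat.length from hlast, List.drop_length]
      simp [verifyLoopA, hdrop]
    · have ha1 : a + 1 < sortat.length := by omega
      have haL : a < sortat.length := by omega
      rw [PySem.List.pyRange_one_cons (by omega)]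
      have hcast : (a : Int) + 1 = ((a + 1 : Nat) : Int) := by push_cast; ring
      have hgx : PySem.List.pyGet? sortat (a : Int) = some (sortat[a]'haL) := by
        rw [PySem.List.pyGet?_natCast]
        exact List.getElem?_eq_getElem haL
      have hgy : PySem.List.pyGet? sortat ((a : Int) + 1) = some (sortat[a + 1]'ha1) := by
        rw [hcast, PySem.List.pyGet?_natCast]
        exact List.getElem?_eq_getElem ha1
      rw [loopA_cons sortat _ _ _ _ hgx hgy]
      have ihrec := ih (a + 1) (by omega)
      rw [List.drop_eq_getElem_cons haL, List.drop_eq_getElem_cons ha1,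
        List.isChain_cons_cons, ← List.drop_eq_getElem_cons ha1]
      by_cases hgt : sortat[a] > sortat[a + 1]
      · simp only [if_pos hgt]
        constructor
        · intro h; exact absurd h (by simp)
        · intro h; omega
      · rw [if_neg hgt, hcast, ihrec]
        constructor
        · intro h; exact ⟨by omega, h⟩
        · intro h; exact h.2

lemma count_le_perm (v s : List Int) (hlen : v.length = s.length)
    (h : ∀ x, v.count x ≤ s.count x) : s.Perm v := by
  have hle : (v : Multiset Int) ≤ (s : Multiset Int) := by
    rw [Multiset.le_iff_count]
    intro a; simpa using h a
  have heq : (v : Multiset Int) = (s : Multiset Int) :=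
    Multiset.eq_of_le_of_card_le hle (by simpa using hlen.ge)
  exact (Multiset.coe_eq_coe.mp heq).symm

lemma A_true_iff (v sortat : List Int) (n : Int) :
    verify v sortat n = true ↔
      ((sortat.length : Int) = n ∧ List.IsChain (· ≤ ·) sortat ∧
        sortat = PySem.List.sorted v (fun x => x) false) := by
  unfold verify
  by_cases h : (sortat.length : Int) = n
  · rw [if_pos h, ← h]
    have hloop := loopA_drop sortat sortat.length 0 (by omega)
    simp only [Nat.cast_zero, List.drop_zero] at hloop
    by_cases hl : verifyLoopA sortat (PySem.List.pyRange 0 ((sortat.length : Int) - 1) 1) = true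
    · rw [if_pos hl]
      by_cases hs : sortat = PySem.List.sorted v (fun x => x) false
      · rw [if_neg (by simp [hs])]
        exact ⟨fun _ => ⟨rfl, hloop.mp hl, hs⟩, fun _ => rfl⟩
      · rw [if_pos hs]
        simp only [Bool.false_eq_true, false_iff]
        rintro ⟨-, -, hc⟩
        exact hs hc
    · simp only [Bool.not_eq_true] at hl
      simp only [hl, Bool.false_eq_true, if_false, false_iff]
      rintro ⟨-, hc, -⟩
      have := hloop.mpr hc
      rw [hl] at this
      exact absurd this (by simp)
  · rw [if_neg h]
    simp only [Bool.false_eq_true, false_iff]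
    rintro ⟨hc, -⟩
    exact h hc

lemma B_true_iff (v sortat : List Int) (n : Int) :
    verify_alt v sortat n = true ↔
      ((sortat.length : Int) = n ∧ v.length = sortat.length ∧
        List.IsChain (· ≤ ·) sortat ∧ ∀ x, v.count x ≤ sortat.count x) := by
  unfold verify_alt
  by_cases h : (sortat.length : Int) = n
  · rw [if_neg (by omega)]
    by_cases hlen : v.length = sortat.length
    · rw [if_neg (by omega)]
      cases hfill : altFill PySem.Dict.empty none sortat with
      | none =>
        simp only [Bool.false_eq_true, false_iff]
        rintro ⟨-, -, hc, -⟩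
        have := (fill_isSome_none sortat PySem.Dict.empty).mpr hc
        rw [hfill] at this
        simp at this
      | some d =>
        have hgetD : ∀ x, d.getD x 0 = (sortat.count x : Int) := by
          intro x
          have := fill_getD sortat PySem.Dict.empty none d hfill x
          simpa using this
        have hnn : ∀ x, 0 ≤ d.getD x 0 := by intro x; rw [hgetD]; positivity
        rw [drain_iff v d hnn]
        have hchain : List.IsChain (· ≤ ·) sortat := by
          rw [← fill_isSome_none sortat PySem.Dict.empty, hfill]; simp
        constructor
        · intro hcnt
          refine ⟨h, hlen, hchain, fun x => ?_⟩
          have := hcnt x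
          rw [hgetD] at this
          exact_mod_cast this
        · intro hcon x
          rw [hgetD]
          exact_mod_cast hcon.2.2.2 x
    · rw [if_pos (by omega)]
      simp only [Bool.false_eq_true, false_iff]
      rintro ⟨-, hc, -⟩
      exact hlen hc
  · rw [if_pos (by omega)]
    simp only [Bool.false_eq_true, false_iff]
    rintro ⟨hc, -⟩
    exact h hc

lemma key_iff (v sortat : List Int) :
    (List.IsChain (· ≤ ·) sortat ∧ sortat = PySem.List.sorted v (fun x => x) false) ↔
      (v.length = sortat.length ∧ List.IsChain (· ≤ ·) sortat ∧
        ∀ x, v.count x ≤ sortat.count x) := by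
  constructor
  · rintro ⟨hchain, heq⟩
    have hperm : sortat.Perm v := by
      rw [heq]; exact PySem.List.sorted_perm v (fun x => x) false
    exact ⟨hperm.length_eq.symm, hchain, fun x => le_of_eq (hperm.count_eq x).symm⟩
  · rintro ⟨hlen, hchain, hcnt⟩
    have hperm : sortat.Perm v := count_le_perm v sortat hlen hcnt
    have hpw : sortat.Pairwise (· ≤ ·) := List.isChain_iff_pairwise.mp hchain
    have hsor : PySem.List.sorted v (fun x => x) false = sortat :=
      PySem.List.sorted_id_eq_of_perm_of_pairwise v sortat hperm hpw
    exact ⟨hchain, hsor.symm⟩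

-- ===== VERDICT (by name: the statement is the Claim_ definition above) =====
theorem verify_spec : Claim_equal_verify := by
  intro v sortat n _
  unfold Spec_verify
  rw [Bool.eq_iff_iff, A_true_iff, B_true_iff]
  constructor
  · rintro ⟨hn, hrest⟩
    have hk := (key_iff v sortat).mp hrest
    exact ⟨hn, hk.1, hk.2.1, hk.2.2⟩
  · rintro ⟨hn, h1, h2, h3⟩
    exact ⟨hn, (key_iff v sortat).mpr ⟨h1, h2, h3⟩⟩
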